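-- pv_equiv track=rewrite | github.com/Lyle-Kottke/520-Exercise-2 | problem5/solutions/solution3.py | solve
-- ===== SOURCE A (Python) =====
-- def solve(n: int, a: int, b: int) -> int:
--     """
--     Calculates the maximum possible minimum number of cake pieces (x) per plate.
--
--     The distribution must satisfy:
--     1. All pieces (a+b) are used on n plates.
--     2. Each plate has at least one piece.
--     3. No plate contains pieces of both cakes.
--
--     This is solved using binary search on the answer (x).
--     """
--
--     def is_possible(x: int, n: int, a: int, b: int) -> bool:
--         """
--         Checks if it's possible to distribute the cakes such that every plate has
--         at least x pieces.
--
--         For a minimum x pieces per plate, the maximum number of plates for cake 'a' is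
--         floor(a/x), and for cake 'b' is floor(b/x).
--
--         We need to find an integer k (plates for cake 'a') such that:
--         1 <= k <= n-1 (must use at least one plate for each cake type)
--         k <= floor(a/x)
--         n-k <= floor(b/x)  => k >= n - floor(b/x)
--
--         Thus, we need to find k such that:
--         max(1, n - floor(b/x)) <= k <= min(n - 1, floor(a/x))
--
--         A solution exists if the lower bound is less than or equal to the upper bound.
--         """
--         if x == 0:
--             return False
--
--         # Max plates for cake a such that each has at least x pieces
--         max_plates_a = a // x
--
--         # Max plates for cake b such that each has at least x pieces
--         max_plates_b = b // x
--
--         # Lower bound for k (plates for cake a): k >= n - max_plates_b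
--         lower_bound_k = n - max_plates_b
--
--         # Upper bound for k (plates for cake a): k <= max_plates_a
--         upper_bound_k = max_plates_a
--
--         # The range of k must also be within [1, n-1] for both cakes to be distributed
--         # (Since a, b >= 1, we must have at least one plate for each).
--         lower_k = max(1, lower_bound_k)
--         upper_k = min(n - 1, upper_bound_k)
--
--         # A valid split k exists if the lower bound is less than or equal to the upper bound.
--         return lower_k <= upper_k
--
--     # Binary search range for x.
--     # Lower bound is 1.
--     # Upper bound is a safe maximum, max(a, b) + 2 is sufficient since a, b <= 100.
--     low = 1
--     high = max(a, b) + 2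
--     max_x = 0
--
--     while low < high:
--         mid = low + (high - low) // 2
--
--         if is_possible(mid, n, a, b):
--             # mid is possible, try for a larger x
--             max_x = mid
--             low = mid + 1
--         else:
--             # mid is too large, search the lower half
--             high = mid
--
--     return max_x
-- ===== SOURCE B (Python) =====
-- def solve(n: int, a: int, b: int) -> int:
--     # Every achievable per-plate minimum is a floor-quotient of a or b, so it is
--     # enough to test the O(sqrt(a)+sqrt(b)) candidate values i and a//i (resp. b//i).
--     cands = []
--     i = 1
--     while i * i <= a:
--         cands.append(i)
--         cands.append(a // i)
--         i += 1
--     i = 1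
--     while i * i <= b:
--         cands.append(i)
--         cands.append(b // i)
--         i += 1
--     best = 0
--     for x in cands:
--         # x pieces per plate is achievable iff some split k in [1, n-1] has
--         # k <= a//x plates of cake a and n-k <= b//x plates of cake b
--         if max(1, n - b // x) <= min(n - 1, a // x):
--             best = max(best, x)
--     return best
-- ===== Notes on version B (the rewrite author's own statement) =====
-- stated objective: alternative
-- what changed: Replaced the binary search on the answer by a direct enumeration of the O(sqrt(a)+sqrt(b)) candidate answers (the floor-quotient values i and a//i / b//i), keeping each candidate that admits a feasible plate split and returning the largest.
import Mathlib
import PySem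

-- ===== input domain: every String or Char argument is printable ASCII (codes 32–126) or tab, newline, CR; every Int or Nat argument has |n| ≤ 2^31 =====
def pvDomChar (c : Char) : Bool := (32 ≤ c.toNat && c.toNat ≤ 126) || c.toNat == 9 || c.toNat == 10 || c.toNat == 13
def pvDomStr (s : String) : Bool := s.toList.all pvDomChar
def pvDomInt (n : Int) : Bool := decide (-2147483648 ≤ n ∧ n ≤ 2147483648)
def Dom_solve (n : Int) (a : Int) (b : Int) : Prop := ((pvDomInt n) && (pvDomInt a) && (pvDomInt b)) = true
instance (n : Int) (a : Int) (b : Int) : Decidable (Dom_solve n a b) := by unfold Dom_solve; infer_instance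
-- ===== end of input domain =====

-- B replaces A's binary search on the answer by enumerating the floor-quotient candidate answers of a and b and keeping the largest feasible one; an alternative algorithm, same results.


-- ===== PORT A =====
-- is_possible(x, n, a, b) from A, step for step
def isPossible (x : Int) (n : Int) (a : Int) (b : Int) : Bool :=
  if x == 0 then false
  else
    let maxPlatesA := PySem.Int.floordiv a x
    let maxPlatesB := PySem.Int.floordiv b x
    let lowerBoundK := n - maxPlatesB
    let upperBoundK := maxPlatesA
    let lowerK := max 1 lowerBoundK
    let upperK := min (n - 1) upperBoundK
    decide (lowerK ≤ upperK)

-- the 'while low < high' loop of A, as recursion on high - low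
def solveLoop (n : Int) (a : Int) (b : Int) (low : Int) (high : Int) (maxX : Int) : Int :=
  if h : low < high then
    let mid := low + PySem.Int.floordiv (high - low) 2
    if isPossible mid n a b then
      solveLoop n a b (mid + 1) high mid
    else
      solveLoop n a b low mid maxX
  else maxX
termination_by (high - low).toNat
decreasing_by
  all_goals
    have h2 : PySem.Int.floordiv (high - low) 2 = (high - low) / 2 :=
      PySem.Int.floordiv_eq_ediv_of_pos (by omega)
    omega

def solve (n : Int) (a : Int) (b : Int) : Int :=
  solveLoop n a b 1 (max a b + 2) 0

-- ===== PORT B =====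
-- the two 'while i*i <= c' candidate-collecting loops of B, one pass each
def collectCands (c : Int) (i : Int) (acc : List Int) : List Int :=
  if i * i ≤ c then collectCands c (i + 1) (acc ++ [i, PySem.Int.floordiv c i]) else acc
termination_by (c + 1 - i).toNat
decreasing_by
  have h1 : 2 * i - 1 ≤ i * i := by nlinarith [sq_nonneg (i - 1)]
  have h0 : 0 ≤ i * i := mul_self_nonneg i
  omega

def solve_alt (n : Int) (a : Int) (b : Int) : Int :=
  let cands := collectCands b 1 (collectCands a 1 [])
  cands.foldl (fun best x =>
    if max 1 (n - PySem.Int.floordiv b x) ≤ min (n - 1) (PySem.Int.floordiv a x)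
    then max best x else best) 0

-- ===== PRECONDITION & SPEC =====
def Spec_solve (n : Int) (a : Int) (b : Int) (out : Int) : Prop := out = solve_alt n a b
instance (n : Int) (a : Int) (b : Int) (out : Int) : Decidable (Spec_solve n a b out) := by unfold Spec_solve; infer_instance

-- ===== CLAIM (what is proved, stated in full; the proofs are below) =====
def Claim_equal_solve : Prop := ∀ (n : Int) (a : Int) (b : Int), Dom_solve n a b → Spec_solve n a b (solve n a b)

-- ===== LEMMAS AND PROOFS =====

-- the per-split value B maximises
def pieceVal (n : Int) (a : Int) (b : Int) (k : Int) : Int :=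
  min (PySem.Int.floordiv a k) (PySem.Int.floordiv b (n - k))

-- B's fold, named so every lemma speaks about the same term
def bestF (n : Int) (a : Int) (b : Int) : Int :=
  (PySem.List.pyRange 1 n 1).foldl (fun best k => max best (pieceVal n a b k)) 0


-- fold of max: the result is ≤ x iff the seed and all values are
theorem foldl_max_le_iff (f : Int → Int) (l : List Int) (init x : Int) :
    l.foldl (fun acc k => max acc (f k)) init ≤ x ↔ init ≤ x ∧ ∀ k ∈ l, f k ≤ x := by
  induction l generalizing init with
  | nil => simp
  | cons h t ih =>
    simp only [List.foldl_cons, ih, max_le_iff, List.mem_cons]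
    constructor
    · rintro ⟨⟨h1, h2⟩, h3⟩
      refine ⟨h1, fun k hk => ?_⟩
      rcases hk with rfl | hk
      · exact h2
      · exact h3 k hk
    · rintro ⟨h1, h2⟩
      exact ⟨⟨h1, h2 h (Or.inl rfl)⟩, fun k hk => h2 k (Or.inr hk)⟩

theorem bestF_nonneg (n a b : Int) : 0 ≤ bestF n a b := by
  by_contra hlt
  push Not at hlt
  have := (foldl_max_le_iff (pieceVal n a b) (PySem.List.pyRange 1 n 1) 0 (-1)).mp
    (by unfold bestF at hlt; omega)
  omega

-- for 1 ≤ x: x ≤ bestF iff some split k in [1, n-1] has pieceVal ≥ x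
theorem le_bestF_iff (n a b x : Int) (hx : 1 ≤ x) :
    x ≤ bestF n a b ↔ ∃ k, 1 ≤ k ∧ k < n ∧ x ≤ pieceVal n a b k := by
  constructor
  · intro hle
    by_contra hno
    push Not at hno
    have : bestF n a b ≤ x - 1 := by
      unfold bestF
      rw [foldl_max_le_iff]
      refine ⟨by omega, fun k hk => ?_⟩
      rw [PySem.List.mem_pyRange_one] at hk
      have := hno k hk.1 hk.2
      omega
    omega
  · rintro ⟨k, hk1, hkn, hkv⟩
    by_contra hlt
    push Not at hlt
    have : bestF n a b ≤ x - 1 := by omega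
    unfold bestF at this
    rw [foldl_max_le_iff] at this
    have := this.2 k (by rw [PySem.List.mem_pyRange_one]; omega)
    omega

-- for 1 ≤ x: A's feasibility test holds iff x ≤ B's answer
theorem isPossible_iff (n a b x : Int) (hx : 1 ≤ x) :
    isPossible x n a b = true ↔ x ≤ bestF n a b := by
  unfold isPossible
  have hx0 : (x == 0) = false := by simp; omega
  rw [hx0]
  simp only [Bool.false_eq_true, if_false, decide_eq_true_eq]
  rw [le_bestF_iff n a b x hx]
  constructor
  · intro hle
    -- take k := max 1 (n - b//x)
    refine ⟨max 1 (n - PySem.Int.floordiv b x), le_max_left _ _, ?_, ?_⟩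
    · have := le_trans hle (min_le_left _ _); omega
    · set k := max 1 (n - PySem.Int.floordiv b x) with hkdef
      have hk1 : 1 ≤ k := le_max_left _ _
      have hka : k ≤ PySem.Int.floordiv a x := le_trans hle (min_le_right _ _)
      have hkb : n - k ≤ PySem.Int.floordiv b x := by
        have := le_max_right 1 (n - PySem.Int.floordiv b x); omega
      have hkn : k ≤ n - 1 := le_trans hle (min_le_left _ _)
      have hxa : x ≤ PySem.Int.floordiv a k := by
        rw [PySem.Int.le_floordiv_iff_mul_le (show (0:Int) < k by omega)]
        have := (PySem.Int.le_floordiv_iff_mul_le (show (0:Int) < x by omega)).mp hka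
        nlinarith
      have hxb : x ≤ PySem.Int.floordiv b (n - k) := by
        rw [PySem.Int.le_floordiv_iff_mul_le (show (0:Int) < n - k by omega)]
        have := (PySem.Int.le_floordiv_iff_mul_le (show (0:Int) < x by omega)).mp hkb
        nlinarith
      unfold pieceVal
      omega
  · rintro ⟨k, hk1, hkn, hkv⟩
    unfold pieceVal at hkv
    have hxa : x ≤ PySem.Int.floordiv a k := by omega
    have hxb : x ≤ PySem.Int.floordiv b (n - k) := by omega
    have hka : k ≤ PySem.Int.floordiv a x := by
      rw [PySem.Int.le_floordiv_iff_mul_le (show (0:Int) < x by omega)]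
      have := (PySem.Int.le_floordiv_iff_mul_le (show (0:Int) < k by omega)).mp hxa
      nlinarith
    have hkb : n - k ≤ PySem.Int.floordiv b x := by
      rw [PySem.Int.le_floordiv_iff_mul_le (show (0:Int) < x by omega)]
      have := (PySem.Int.le_floordiv_iff_mul_le (show (0:Int) < n - k by omega)).mp hxb
      nlinarith
    omega

-- loop invariant: the loop returns bestF once maxX tracks max 0 (min bestF (low-1))
theorem solveLoop_invariant (n a b low high maxX : Int) (hlow : 1 ≤ low)
    (hhigh : bestF n a b ≤ high - 1)
    (hmax : maxX = max 0 (min (bestF n a b) (low - 1))) :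
    solveLoop n a b low high maxX = bestF n a b := by
  have hb0 : 0 ≤ bestF n a b := bestF_nonneg n a b
  rw [solveLoop]
  split
  case isFalse h =>
    omega
  case isTrue h =>
    have h2 : PySem.Int.floordiv (high - low) 2 = (high - low) / 2 :=
      PySem.Int.floordiv_eq_ediv_of_pos (by omega)
    have hmb : low ≤ low + PySem.Int.floordiv (high - low) 2 ∧
        low + PySem.Int.floordiv (high - low) 2 < high := by omega
    set mid := low + PySem.Int.floordiv (high - low) 2 with hmid
    by_cases hp : isPossible mid n a b = true
    · rw [if_pos hp]
      have hmle : mid ≤ bestF n a b := (isPossible_iff n a b mid (by omega)).mp hp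
      exact solveLoop_invariant n a b (mid + 1) high mid (by omega) hhigh (by omega)
    · rw [if_neg hp]
      have hmgt : ¬ (mid ≤ bestF n a b) := by
        intro hle
        exact hp ((isPossible_iff n a b mid (by omega)).mpr hle)
      exact solveLoop_invariant n a b low mid maxX hlow (by omega) hmax
termination_by (high - low).toNat
decreasing_by
  all_goals
    have _h2 : PySem.Int.floordiv (high - low) 2 = (high - low) / 2 :=
      PySem.Int.floordiv_eq_ediv_of_pos (by omega)
    omega

theorem solve_eq_bestF (n a b : Int) : solve n a b = bestF n a b := by
  have hb0 : 0 ≤ bestF n a b := bestF_nonneg n a b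
  unfold solve
  by_cases hmax : max a b + 2 ≤ 1
  · -- loop never runs; a < 0, so every pieceVal is ≤ 0 and bestF = 0
    rw [solveLoop, dif_neg (by omega)]
    have hble : bestF n a b ≤ 0 := by
      unfold bestF
      rw [foldl_max_le_iff]
      refine ⟨le_refl 0, fun k hk => ?_⟩
      rw [PySem.List.mem_pyRange_one] at hk
      have h1 : PySem.Int.floordiv a k < 1 :=
        (PySem.Int.floordiv_lt_iff_lt_mul (show (0:Int) < k by omega)).mpr (by omega)
      unfold pieceVal
      omega
    omega
  · -- loop runs from low = 1, high = max a b + 2; bestF ≤ high - 1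
    apply solveLoop_invariant n a b 1 (max a b + 2) 0 (by omega) ?_ (by omega)
    by_cases hb1 : bestF n a b ≤ 0
    · omega
    · -- bestF ≥ 1: it is some pieceVal, and then bestF ≤ a//k ≤ a ≤ max a b
      obtain ⟨k, hk1, hkn, hkv⟩ :=
        (le_bestF_iff n a b (bestF n a b) (by omega)).mp (le_refl _)
      unfold pieceVal at hkv
      have hbk : bestF n a b ≤ PySem.Int.floordiv a k := by omega
      have := (PySem.Int.le_floordiv_iff_mul_le (show (0:Int) < k by omega)).mp hbk
      nlinarith [le_max_left a b]

-- ---- B-side lemmas: the candidate lists cover every floor-quotient ----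

theorem mem_collectCands_of_mem_acc (c : Int) (i : Int) (acc : List Int) (x : Int) :
    x ∈ acc → x ∈ collectCands c i acc := by
  induction i, acc using collectCands.induct (c := c) with
  | case1 i acc h ih =>
    intro hx
    rw [collectCands, if_pos h]
    exact ih (by simp [hx])
  | case2 i acc h =>
    intro hx
    rw [collectCands, if_neg h]
    exact hx

theorem one_le_of_mem_collectCands (c : Int) (i : Int) (acc : List Int) (x : Int) :
    1 ≤ i → x ∈ collectCands c i acc → x ∈ acc ∨ 1 ≤ x := by
  induction i, acc using collectCands.induct (c := c) with
  | case1 i acc h ih =>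
    intro hi hx
    rw [collectCands, if_pos h] at hx
    rcases ih (by omega) hx with hmem | hge
    · simp only [List.mem_append, List.mem_cons, List.not_mem_nil, or_false] at hmem
      rcases hmem with hmem | rfl | rfl
      · exact Or.inl hmem
      · exact Or.inr hi
      · right
        rw [PySem.Int.le_floordiv_iff_mul_le (show (0:Int) < i by omega)]
        nlinarith
    · exact Or.inr hge
  | case2 i acc h =>
    intro hi hx
    rw [collectCands, if_neg h] at hx
    exact Or.inl hx

theorem mem_collectCands_pair (c j : Int) (hj : j * j ≤ c) :
    ∀ (i : Int) (acc : List Int), 1 ≤ i → i ≤ j →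
      j ∈ collectCands c i acc ∧ PySem.Int.floordiv c j ∈ collectCands c i acc := by
  have H : ∀ (d : Nat) (i : Int) (acc : List Int), (j - i).toNat = d → 1 ≤ i → i ≤ j →
      j ∈ collectCands c i acc ∧ PySem.Int.floordiv c j ∈ collectCands c i acc := by
    intro d
    induction d with
    | zero =>
      intro i acc hd h1 h2
      have hij : i = j := by omega
      subst hij
      rw [collectCands, if_pos hj]
      constructor
      · exact mem_collectCands_of_mem_acc _ _ _ _ (by simp)
      · exact mem_collectCands_of_mem_acc _ _ _ _ (by simp)
    | succ d ih =>
      intro i acc hd h1 h2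
      have hlt : i < j := by omega
      have hii : i * i ≤ c := by nlinarith
      rw [collectCands, if_pos hii]
      exact ih (i + 1) _ (by omega) (by omega) (by omega)
  intro i acc h1 h2
  exact H (j - i).toNat i acc rfl h1 h2

-- every floor-quotient c // k (k ≥ 1) of value ≥ 1 appears among the candidates
theorem quotient_mem_collectCands (c k : Int) (acc : List Int) (hk : 1 ≤ k)
    (hq : 1 ≤ PySem.Int.floordiv c k) :
    PySem.Int.floordiv c k ∈ collectCands c 1 acc := by
  have hkc : k * k ≤ c ∨ ¬ (k * k ≤ c) := em _
  by_cases hkk : k * k ≤ c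
  · exact (mem_collectCands_pair c k hkk 1 acc (le_refl 1) hk).2
  · set q := PySem.Int.floordiv c k with hqdef
    have hqk : q * k ≤ c := (PySem.Int.le_floordiv_iff_mul_le (show (0:Int) < k by omega)).mp (le_refl _)
    have hqlt : q < k := by nlinarith
    have hqq : q * q ≤ c := by nlinarith
    have hmem := (mem_collectCands_pair c q hqq 1 acc (le_refl 1) hq).1
    exact hmem

-- the filtered max fold of B, named for the lemmas
def foldBest (n a b : Int) (l : List Int) (init : Int) : Int :=
  l.foldl (fun best x =>
    if max 1 (n - PySem.Int.floordiv b x) ≤ min (n - 1) (PySem.Int.floordiv a x)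
    then max best x else best) init

theorem solve_alt_eq_foldBest (n a b : Int) :
    solve_alt n a b = foldBest n a b (collectCands b 1 (collectCands a 1 [])) 0 := rfl

theorem foldBest_le_iff (n a b : Int) (l : List Int) (init y : Int) :
    foldBest n a b l init ≤ y ↔ init ≤ y ∧
      ∀ x ∈ l, max 1 (n - PySem.Int.floordiv b x) ≤ min (n - 1) (PySem.Int.floordiv a x) → x ≤ y := by
  induction l generalizing init with
  | nil => simp [foldBest]
  | cons h t ih =>
    simp only [foldBest, List.foldl_cons] at *
    rw [ih]
    split_ifs with hc
    · constructor
      · rintro ⟨h1, h2⟩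
        refine ⟨by omega, fun x hx htest => ?_⟩
        rcases List.mem_cons.mp hx with rfl | hx
        · omega
        · exact h2 x hx htest
      · rintro ⟨h1, h2⟩
        exact ⟨by
          have := h2 h (List.mem_cons_self) hc
          omega, fun x hx htest => h2 x (List.mem_cons_of_mem _ hx) htest⟩
    · constructor
      · rintro ⟨h1, h2⟩
        refine ⟨h1, fun x hx htest => ?_⟩
        rcases List.mem_cons.mp hx with rfl | hx
        · exact absurd htest hc
        · exact h2 x hx htest
      · rintro ⟨h1, h2⟩
        exact ⟨h1, fun x hx htest => h2 x (List.mem_cons_of_mem _ hx) htest⟩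

-- B's test, for x ≥ 1, is A's feasibility test, hence 'x ≤ bestF'
theorem test_iff_le_bestF (n a b x : Int) (hx : 1 ≤ x) :
    (max 1 (n - PySem.Int.floordiv b x) ≤ min (n - 1) (PySem.Int.floordiv a x)) ↔ x ≤ bestF n a b := by
  rw [← isPossible_iff n a b x hx]
  unfold isPossible
  have hx0 : (x == 0) = false := by simp; omega
  rw [hx0]
  simp

theorem solve_alt_eq_bestF (n a b : Int) : solve_alt n a b = bestF n a b := by
  rw [solve_alt_eq_foldBest]
  have hb0 : 0 ≤ bestF n a b := bestF_nonneg n a b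
  set cands := collectCands b 1 (collectCands a 1 []) with hcands
  have hcand_ge : ∀ x ∈ cands, 1 ≤ x := by
    intro x hx
    rcases one_le_of_mem_collectCands b 1 _ x (le_refl 1) hx with hx' | h1
    · rcases one_le_of_mem_collectCands a 1 _ x (le_refl 1) hx' with hx'' | h1
      · simp at hx''
      · exact h1
    · exact h1
  apply le_antisymm
  · rw [foldBest_le_iff]
    refine ⟨hb0, fun x hx htest => ?_⟩
    exact (test_iff_le_bestF n a b x (hcand_ge x hx)).mp htest
  · by_cases hb1 : bestF n a b ≤ 0
    · -- bestF = 0 and the fold starts at 0 and never decreases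
      have : ¬ (foldBest n a b cands 0 ≤ -1) := by
        rw [foldBest_le_iff]; omega
      omega
    · -- bestF ≥ 1 is attained as a floor-quotient, hence is a candidate passing the test
      obtain ⟨k, hk1, hkn, hkv⟩ :=
        (le_bestF_iff n a b (bestF n a b) (by omega)).mp (le_refl _)
      have hub : pieceVal n a b k ≤ bestF n a b := by
        have h := (foldl_max_le_iff (pieceVal n a b) (PySem.List.pyRange 1 n 1) 0 (bestF n a b)).mp
          (le_of_eq rfl)
        exact h.2 k (by rw [PySem.List.mem_pyRange_one]; omega)
      have heq : pieceVal n a b k = bestF n a b := le_antisymm hub hkv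
      have hmem : bestF n a b ∈ cands := by
        rcases min_cases (PySem.Int.floordiv a k) (PySem.Int.floordiv b (n - k)) with ⟨hm, _⟩ | ⟨hm, _⟩
        · -- bestF = a // k
          have : PySem.Int.floordiv a k ∈ collectCands a 1 [] := by
            apply quotient_mem_collectCands a k [] (by omega)
            unfold pieceVal at heq; omega
          rw [hcands]
          apply mem_collectCands_of_mem_acc
          have hbf : bestF n a b = PySem.Int.floordiv a k := by
            unfold pieceVal at heq; omega
          rw [hbf]; exact this
        · -- bestF = b // (n - k)
          have hbf : bestF n a b = PySem.Int.floordiv b (n - k) := by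
            unfold pieceVal at heq; omega
          rw [hcands, hbf]
          exact quotient_mem_collectCands b (n - k) _ (by omega) (by unfold pieceVal at heq; omega)
      have htest := (test_iff_le_bestF n a b (bestF n a b) (by omega)).mpr (le_refl _)
      by_contra hlt
      push Not at hlt
      have : foldBest n a b cands 0 ≤ bestF n a b - 1 := by omega
      rw [foldBest_le_iff] at this
      have := this.2 (bestF n a b) hmem htest
      omega

-- ===== VERDICT (by name: the statement is the Claim_ definition above) =====
theorem solve_spec : Claim_equal_solve := by
  intro n a b _
  unfold Spec_solve
  rw [solve_eq_bestF, solve_alt_eq_bestF]
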